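-- pv_equiv track=rewrite | github.com/ajmoore143/KEGGBLAST | blast_ncbi.py | parse_ncbi_blast_text
-- ===== SOURCE A (Python) =====
-- def parse_ncbi_blast_text(text):
--     """
--     Convert plain-text BLAST output to structured list of hits (limited detail).
--     Returns list of dicts.
--     """
--     hits = []
--     current = {}
--
--     for line in text.splitlines():
--         if line.startswith(">"):
--             if current:
--                 hits.append(current)
--             current = {"subject_title": line[1:].strip()}
--         elif "Score =" in line:
--             parts = line.split(",")
--             score = parts[0].split("=")[-1].strip()
--             evalue = parts[1].split("=")[-1].strip() if len(parts) > 1 else None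
--             current["bit_score"] = score
--             current["evalue"] = evalue
--     if current:
--         hits.append(current)
--
--     return hits
-- ===== SOURCE B (Python) =====
-- def parse_ncbi_blast_text(text):
--     """
--     Convert plain-text BLAST output to structured list of hits (limited detail).
--     Two-phase: group lines into records at '>' headers, then map each group to a dict.
--     """
--     # phase 1: group the lines
--     done = []
--     header, body = None, []
--     for line in text.splitlines():
--         if line.startswith(">"):
--             done.append((header, body))
--             header, body = line, []
--         else:
--             body.append(line)
--     done.append((header, body))
--
--     # phase 2: render each group
--     out = []
--     for header, body in done:
--         score_line = None
--         for line in body: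
--             if "Score =" in line:
--                 score_line = line
--         d = {}
--         if header is not None:
--             d["subject_title"] = header[1:].strip()
--         if score_line is not None:
--             parts = score_line.split(",")
--             d["bit_score"] = parts[0].split("=")[-1].strip()
--             d["evalue"] = parts[1].split("=")[-1].strip() if len(parts) > 1 else None
--         if d:
--             out.append(d)
--     return out
-- ===== Notes on version B (the rewrite author's own statement) =====
-- stated objective: alternative
-- what changed: A's single stateful loop that mutates a current dict is replaced by a two-phase decomposition: first group the lines into records at header lines, then independently render each group from its header and its last score line, emitting the headerless leading group only when it has a score line.
import Mathlib
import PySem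

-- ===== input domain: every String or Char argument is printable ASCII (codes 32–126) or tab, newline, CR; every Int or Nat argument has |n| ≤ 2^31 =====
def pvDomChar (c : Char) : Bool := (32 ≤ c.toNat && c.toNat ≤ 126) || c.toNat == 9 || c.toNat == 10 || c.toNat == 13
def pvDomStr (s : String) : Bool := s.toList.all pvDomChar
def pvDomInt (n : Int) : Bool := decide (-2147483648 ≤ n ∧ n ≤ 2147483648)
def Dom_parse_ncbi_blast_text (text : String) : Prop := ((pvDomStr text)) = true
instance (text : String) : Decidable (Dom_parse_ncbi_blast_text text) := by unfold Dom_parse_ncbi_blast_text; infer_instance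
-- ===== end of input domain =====

-- B re-implements the parser as two phases (group lines at '>' headers, then render each
-- group from its last 'Score =' line) instead of A's single stateful dict-mutating loop;
-- objective: alternative decomposition, same output.

-- shared leaf: parse "Score = …, Expect = …" into (bit_score, evalue), exactly as
-- parts[0].split("=")[-1].strip() / parts[1].split("=")[-1].strip() if len(parts)>1 else None
def pvScoreOf (line : String) : String × Option String :=
  let parts := (PySem.Str.split? line ",").getD []
  (PySem.Str.strip (PySem.List.pyGetD ((PySem.Str.split? (PySem.List.pyGetD parts 0 "") "=").getD []) (-1) ""),
   if 1 < parts.length then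
     some (PySem.Str.strip (PySem.List.pyGetD ((PySem.Str.split? (PySem.List.pyGetD parts 1 "") "=").getD []) (-1) ""))
   else none)

-- ===== PORT A =====
def pvAStep (st : List (PySem.Dict String (Option String)) × PySem.Dict String (Option String))
    (line : String) :
    List (PySem.Dict String (Option String)) × PySem.Dict String (Option String) :=
  if PySem.Str.startswith line ">" then
    (if st.2.items.isEmpty then st.1 else st.1 ++ [st.2],
     PySem.Dict.mk [("subject_title", some (PySem.Str.strip (PySem.Str.slice line (some 1) none)))])
  else if PySem.Str.isIn "Score =" line then
    (st.1, (st.2.insert "bit_score" (some (pvScoreOf line).1)).insert "evalue" (pvScoreOf line).2)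
  else st

def parse_ncbi_blast_text (text : String) : List (List (String × Option String)) :=
  let st := (PySem.Str.splitlines text).foldl pvAStep ([], PySem.Dict.mk [])
  (if st.2.items.isEmpty then st.1 else st.1 ++ [st.2]).map PySem.Dict.items

-- ===== PORT B =====
-- phase 1: group the lines — state is (finished groups, current (header?, body))
def pvGroupStep (st : List (Option String × List String) × (Option String × List String))
    (line : String) :
    List (Option String × List String) × (Option String × List String) :=
  if PySem.Str.startswith line ">" then (st.1 ++ [st.2], (some line, []))
  else (st.1, (st.2.1, st.2.2 ++ [line]))

-- the LAST line of body containing "Score ="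
def pvLastScore (body : List String) : Option String :=
  body.foldl (fun acc line => if PySem.Str.isIn "Score =" line then some line else acc) none

-- phase 2: render one group as a dict (assoc list; all keys are distinct by construction)
def pvRender (g : Option String × List String) : List (String × Option String) :=
  (match g.1 with
   | none => []
   | some h => [("subject_title", some (PySem.Str.strip (PySem.Str.slice h (some 1) none)))]) ++
  (match pvLastScore g.2 with
   | none => []
   | some l => [("bit_score", some (pvScoreOf l).1), ("evalue", (pvScoreOf l).2)])

def parse_ncbi_blast_text_alt (text : String) : List (List (String × Option String)) :=
  let st := (PySem.Str.splitlines text).foldl pvGroupStep ([], (none, []))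
  ((st.1 ++ [st.2]).map pvRender).filter (fun d => !d.isEmpty)

-- ===== PRECONDITION & SPEC =====
def Spec_parse_ncbi_blast_text (text : String) (out : List (List (String × Option String))) : Prop := out = parse_ncbi_blast_text_alt text
instance (text : String) (out : List (List (String × Option String))) : Decidable (Spec_parse_ncbi_blast_text text out) := by unfold Spec_parse_ncbi_blast_text; infer_instance

-- ===== CLAIM (what is proved, stated in full; the proofs are below) =====
def Claim_equal_parse_ncbi_blast_text : Prop := ∀ (text : String), Dom_parse_ncbi_blast_text text → Spec_parse_ncbi_blast_text text (parse_ncbi_blast_text text)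

-- ===== LEMMAS AND PROOFS =====

-- emitted hit list of a list of finished groups (A-side view: as dicts)
def pvEmit (gs : List (Option String × List String)) :
    List (PySem.Dict String (Option String)) :=
  (((gs.map pvRender).filter (fun d => !d.isEmpty)).map PySem.Dict.mk)

-- appending one line to a body updates the last score line in the obvious way
theorem pvLastScore_append (body : List String) (l : String) :
    pvLastScore (body ++ [l])
      = if PySem.Str.isIn "Score =" l then some l else pvLastScore body := by
  simp [pvLastScore, List.foldl_append]

-- the main loop correspondence: A's (hits, current) state is the emitted form of B's
-- (finished groups, current group) state, line by line
theorem pvMain (lines : List String) :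
    ∀ (done : List (Option String × List String)) (cur : Option String × List String),
    lines.foldl pvAStep (pvEmit done, PySem.Dict.mk (pvRender cur))
      = (pvEmit (lines.foldl pvGroupStep (done, cur)).1,
         PySem.Dict.mk (pvRender (lines.foldl pvGroupStep (done, cur)).2)) := by
  induction lines with
  | nil => intro done cur; rfl
  | cons l ls ih =>
    intro done cur
    simp only [List.foldl_cons]
    by_cases hs : PySem.Str.startswith l ">" = true
    · have h2 : PySem.Dict.mk [("subject_title", some (PySem.Str.strip (PySem.Str.slice l (some 1) none)))]
          = PySem.Dict.mk (pvRender (some l, ([] : List String))) := by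
        simp [pvRender, pvLastScore]
      have hA : pvAStep (pvEmit done, PySem.Dict.mk (pvRender cur)) l
          = (pvEmit (done ++ [cur]), PySem.Dict.mk (pvRender (some l, ([] : List String)))) := by
        simp only [pvAStep]
        rw [if_pos hs, ← h2]
        cases hE : (pvRender cur).isEmpty <;>
          simp [hE, pvEmit, List.filter_append]
      have hB : pvGroupStep (done, cur) l = (done ++ [cur], (some l, [])) := by
        simp only [pvGroupStep]; rw [if_pos hs]
      rw [hA, hB]; exact ih _ _
    · have hB : pvGroupStep (done, cur) l = (done, (cur.1, cur.2 ++ [l])) := by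
        simp only [pvGroupStep]; rw [if_neg hs]
      by_cases hin : PySem.Str.isIn "Score =" l = true
      · have hA : pvAStep (pvEmit done, PySem.Dict.mk (pvRender cur)) l
            = (pvEmit done, PySem.Dict.mk (pvRender (cur.1, cur.2 ++ [l]))) := by
          rcases cur with ⟨hd, body⟩
          simp only [pvAStep, pvRender]
          rw [if_neg hs, if_pos hin, pvLastScore_append, if_pos hin]
          rcases hd with _ | h <;> rcases hls : pvLastScore body with _ | sl <;>
            simp [PySem.Dict.insert, PySem.Dict.contains]
        rw [hA, hB]; exact ih _ _
      · have hA : pvAStep (pvEmit done, PySem.Dict.mk (pvRender cur)) l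
            = (pvEmit done, PySem.Dict.mk (pvRender (cur.1, cur.2 ++ [l]))) := by
          rcases cur with ⟨hd, body⟩
          simp only [pvAStep, pvRender]
          rw [if_neg hs, if_neg hin, pvLastScore_append, if_neg hin]
        rw [hA, hB]; exact ih _ _

-- ===== VERDICT (by name: the statement is the Claim_ definition above) =====
theorem parse_ncbi_blast_text_spec : Claim_equal_parse_ncbi_blast_text := by
  intro text _
  show parse_ncbi_blast_text text = parse_ncbi_blast_text_alt text
  have h0 : (([] : List (PySem.Dict String (Option String))),
        PySem.Dict.mk ([] : List (String × Option String)))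
      = (pvEmit [], PySem.Dict.mk (pvRender (none, ([] : List String)))) := by
    simp [pvEmit, pvRender, pvLastScore]
  have h := pvMain (PySem.Str.splitlines text) [] (none, [])
  simp only [parse_ncbi_blast_text, parse_ncbi_blast_text_alt]
  rw [h0, h]
  cases hE : (pvRender ((PySem.Str.splitlines text).foldl pvGroupStep ([], (none, []))).2).isEmpty <;>
    simp [pvEmit, hE, List.filter_append, List.map_map, Function.comp_def]
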